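-- pv_equiv track=rewrite | github.com/benpaddlejones/myCipherForge | additional_ciphers.py | xor_decrypt
-- ===== SOURCE A (Python) =====
-- def xor_decrypt(text, key):
--     """Reverse XOR encryption.
--
--     Uses subtraction to reverse the addition-based cipher.
--     """
--     xor_key = key.get("xor_value", 42) % 95
--     result = []
--     for char in text:
--         if 32 <= ord(char) <= 126:
--             pos = ord(char) - 32
--             new_pos = (pos - xor_key) % 95  # Subtract to reverse
--             result.append(chr(new_pos + 32))
--         else:
--             result.append(char)
--     return ''.join(result)
-- ===== SOURCE B (Python) =====
-- _PRINTABLE = bytes(range(32, 127)).decode()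
--
-- def xor_decrypt(text, key):
--     """Reverse the shift cipher by rotating the printable alphabet once and translating."""
--     k = key.get("xor_value", 42) % 95
--     rotated = _PRINTABLE[95 - k:] + _PRINTABLE[:95 - k]
--     return text.translate(str.maketrans(_PRINTABLE, rotated))
-- ===== Notes on version B (the rewrite author's own statement) =====
-- stated objective: faster
-- what changed: B removes the per-character modular arithmetic and branch entirely: it rotates the constant printable alphabet once by string slicing and applies str.translate with a str.maketrans table in a single C-level call, with no Python-level loop.
import Mathlib
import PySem

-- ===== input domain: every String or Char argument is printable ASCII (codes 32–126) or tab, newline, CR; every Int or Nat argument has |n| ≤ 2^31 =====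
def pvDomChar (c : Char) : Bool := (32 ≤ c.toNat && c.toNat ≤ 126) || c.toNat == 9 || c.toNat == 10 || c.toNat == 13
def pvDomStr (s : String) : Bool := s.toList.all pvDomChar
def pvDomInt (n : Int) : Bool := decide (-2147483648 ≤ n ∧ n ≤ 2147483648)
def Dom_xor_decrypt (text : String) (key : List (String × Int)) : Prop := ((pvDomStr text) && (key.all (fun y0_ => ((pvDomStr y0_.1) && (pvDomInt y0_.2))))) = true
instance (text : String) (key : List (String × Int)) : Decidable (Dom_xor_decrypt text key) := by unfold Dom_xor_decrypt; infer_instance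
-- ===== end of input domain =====

-- B drops A's per-character modular arithmetic and branch: it rotates the printable alphabet once by slicing and applies one maketrans/translate pass (idiomatic).

-- ===== PORT A =====
-- literal transliteration of A: dict.get with default, then a loop appending to `result`, joined at the end
def xor_decrypt (text : String) (key : List (String × Int)) : String :=
  let xor_key : Int := PySem.Int.mod ((PySem.Dict.ofList key).getD "xor_value" 42) 95
  let result : List Char := text.toList.foldl (fun r char =>
    if 32 ≤ (char.toNat : Int) ∧ (char.toNat : Int) ≤ 126 then
      let pos : Int := (char.toNat : Int) - 32
      let new_pos : Int := PySem.Int.mod (pos - xor_key) 95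
      r ++ [Char.ofNat (new_pos + 32).toNat]
    else r ++ [char]) []
  String.ofList result

-- ===== PORT B =====
-- _PRINTABLE = bytes(range(32,127)).decode(): the 95 printable ASCII characters in order
def pvPrintable : List Char := (List.range 95).map (fun i => Char.ofNat (32 + i))

-- str.maketrans(x, y): the dict {ord(x[i]): ord(y[i]) for i in range(len(x))}
def pvMaketrans (x y : List Char) : PySem.Dict Int Int :=
  (List.range x.length).foldl
    (fun d i => d.insert ((x[i]!).toNat : Int) ((y[i]!).toNat : Int)) PySem.Dict.empty

-- str.translate(table): map each codepoint through the table, absent codepoints unchanged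
def pvTranslate (s : List Char) (t : PySem.Dict Int Int) : List Char :=
  s.map (fun ch =>
    match t.get? (ch.toNat : Int) with
    | some v => Char.ofNat v.toNat
    | none => ch)

-- literal transliteration of Source B: rotate the alphabet by slicing, then one translate call
def xor_decrypt_alt (text : String) (key : List (String × Int)) : String :=
  let k : Int := PySem.Int.mod ((PySem.Dict.ofList key).getD "xor_value" 42) 95
  let rotated : List Char :=
    PySem.List.slice pvPrintable (some (95 - k)) none ++ PySem.List.slice pvPrintable none (some (95 - k))
  String.ofList (pvTranslate text.toList (pvMaketrans pvPrintable rotated))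

-- ===== PRECONDITION & SPEC =====
def Spec_xor_decrypt (text : String) (key : List (String × Int)) (out : String) : Prop := out = xor_decrypt_alt text key
instance (text : String) (key : List (String × Int)) (out : String) : Decidable (Spec_xor_decrypt text key out) := by unfold Spec_xor_decrypt; infer_instance

-- ===== CLAIM (what is proved, stated in full; the proofs are below) =====
def Claim_equal_xor_decrypt : Prop := ∀ (text : String) (key : List (String × Int)), Dom_xor_decrypt text key → Spec_xor_decrypt text key (xor_decrypt text key)

-- ===== LEMMAS AND PROOFS =====

-- a fold whose every step appends one element (either branch) is a map of the branched element
theorem foldl_ite_append_singleton {α β : Type} (p : α → Prop) [DecidablePred p]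
    (f g : α → β) (l : List α) (acc : List β) :
    l.foldl (fun r ch => if p ch then r ++ [f ch] else r ++ [g ch]) acc
      = acc ++ l.map (fun ch => if p ch then f ch else g ch) := by
  induction l generalizing acc with
  | nil => simp
  | cons x xs ih =>
    simp only [List.foldl, List.map]
    by_cases h : p x <;> simp [h, ih]

theorem pvPrintable_getElem! (i : Nat) (hi : i < 95) : pvPrintable[i]! = Char.ofNat (32 + i) := by
  unfold pvPrintable
  rw [getElem!_pos _ i (by simpa using hi)]
  simp

theorem pvPrintable_length : pvPrintable.length = 95 := by unfold pvPrintable; simp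

-- the rotated alphabet, read at position pos, is the alphabet read at (pos + m) mod 95
theorem rot_getElem! (m pos : Nat) (hm : m ≤ 95) (hpos : pos < 95) :
    (pvPrintable.drop m ++ pvPrintable.take m)[pos]! = Char.ofNat (32 + (pos + m) % 95) := by
  have hlen : (pvPrintable.drop m ++ pvPrintable.take m).length = 95 := by
    simp [pvPrintable_length]; omega
  rw [getElem!_pos _ pos (by omega)]
  by_cases hlt : pos < 95 - m
  · rw [List.getElem_append_left (by simp [pvPrintable_length]; omega)]
    rw [List.getElem_drop, ← getElem!_pos pvPrintable (m + pos) (by simp [pvPrintable_length]; omega),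
        pvPrintable_getElem! _ (by omega)]
    congr 1; omega
  · rw [List.getElem_append_right (by simp [pvPrintable_length]; omega)]
    simp only [List.getElem_take]
    rw [← getElem!_pos pvPrintable _ (by simp [pvPrintable_length]; omega),
        pvPrintable_getElem! _ (by simp [pvPrintable_length]; omega)]
    congr 1
    simp [pvPrintable_length]
    omega

theorem toNat_ofNat_small (n : Nat) (h : n < 1000) : (Char.ofNat n).toNat = n := by
  have hv : n.isValidChar := Or.inl (by omega)
  rw [Char.ofNat, dif_pos hv]
  rfl

-- lookup in a table built by inserting v i at key 32+i for every i < n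
theorem get?_foldl_insert_range (n : Nat) (v : Nat → Int) (d : PySem.Dict Int Int) (c : Int) :
    ((List.range n).foldl (fun d i => d.insert (((32 + i : Nat) : Int)) (v i)) d).get? c =
      if 32 ≤ c ∧ c < 32 + n then some (v (c - 32).toNat) else d.get? c := by
  induction n generalizing d with
  | zero =>
    simp only [List.range_zero, List.foldl_nil]
    rw [if_neg (by omega)]
  | succ m ih =>
    rw [List.range_succ, List.foldl_append]
    simp only [List.foldl]
    rw [PySem.Dict.get?_insert, ih]
    split_ifs with h1 h2 h2 h3 h3 <;> first
      | (congr 1; congr 1; omega)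
      | rfl

-- lookup in maketrans(PRINTABLE, y): the y-character at the key's alphabet position
theorem get?_maketrans (y : List Char) (c : Int) :
    (pvMaketrans pvPrintable y).get? c =
      if 32 ≤ c ∧ c < 127 then some ((y[(c - 32).toNat]!).toNat : Int) else none := by
  unfold pvMaketrans
  rw [pvPrintable_length]
  have hfold : ((List.range 95).foldl
      (fun d i => d.insert ((pvPrintable[i]!).toNat : Int) ((y[i]!).toNat : Int)) PySem.Dict.empty) =
      ((List.range 95).foldl
      (fun d i => d.insert (((32 + i : Nat) : Int)) ((y[i]!).toNat : Int)) PySem.Dict.empty) := by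
    apply PySem.List.foldl_congr_mem
    intro d i hi
    rw [pvPrintable_getElem! i (by simpa using List.mem_range.mp hi),
        toNat_ofNat_small _ (by have := List.mem_range.mp hi; omega)]
  rw [hfold, get?_foldl_insert_range 95 (fun i => ((y[i]!).toNat : Int)) PySem.Dict.empty]
  split_ifs with h1 h2 h2 <;> first | rfl | omega

-- the two per-character transformations agree for every character
theorem perchar_eq (k : Int) (hk0 : 0 ≤ k) (hk95 : k < 95) (ch : Char) :
    (if 32 ≤ (ch.toNat : Int) ∧ (ch.toNat : Int) ≤ 126 then
        Char.ofNat (PySem.Int.mod ((ch.toNat : Int) - 32 - k) 95 + 32).toNat else ch)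
      = match (pvMaketrans pvPrintable
          (PySem.List.slice pvPrintable (some (95 - k)) none ++
           PySem.List.slice pvPrintable none (some (95 - k)))).get? (ch.toNat : Int) with
        | some v => Char.ofNat v.toNat
        | none => ch := by
  have hm : (95 - k) = (((95 - k).toNat : Nat) : Int) := by omega
  rw [hm, PySem.List.slice_from_natCast, PySem.List.slice_to_natCast]
  rw [get?_maketrans _ (ch.toNat : Int)]
  by_cases hch : 32 ≤ (ch.toNat : Int) ∧ (ch.toNat : Int) ≤ 126
  · rw [if_pos hch, if_pos (by omega)]
    simp only
    rw [rot_getElem! (95 - k).toNat (((ch.toNat : Int) - 32).toNat) (by omega) (by omega),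
        toNat_ofNat_small _ (by omega)]
    congr 1
    have hmod : PySem.Int.mod ((ch.toNat : Int) - 32 - k) 95 =
        (((((ch.toNat : Int) - 32).toNat + (95 - k).toNat) % 95 : Nat) : Int) := by
      rw [PySem.Int.mod_eq_emod_of_pos (a := (ch.toNat : Int) - 32 - k) (b := 95) (by omega)]
      have h1 : ((ch.toNat : Int) - 32 - k) =
          ((((ch.toNat : Int) - 32).toNat + (95 - k).toNat : Nat) : Int) - 95 := by push_cast; omega
      rw [h1, Int.sub_emod_right]; norm_cast
    rw [hmod]
    omega
  · rw [if_neg hch, if_neg (by omega)]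

-- ===== VERDICT (by name: the statement is the Claim_ definition above) =====
set_option maxRecDepth 8000 in
set_option maxHeartbeats 800000 in
theorem xor_decrypt_spec : Claim_equal_xor_decrypt := by
  intro text key _
  unfold Spec_xor_decrypt xor_decrypt xor_decrypt_alt pvTranslate
  simp only
  have hk0 : 0 ≤ PySem.Int.mod ((PySem.Dict.ofList key).getD "xor_value" 42) 95 :=
    PySem.Int.mod_nonneg _ (by omega)
  have hk95 : PySem.Int.mod ((PySem.Dict.ofList key).getD "xor_value" 42) 95 < 95 :=
    PySem.Int.mod_lt _ (by omega)
  rw [foldl_ite_append_singleton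
        (p := fun char : Char => 32 ≤ (char.toNat : Int) ∧ (char.toNat : Int) ≤ 126)
        (f := fun char : Char => Char.ofNat (PySem.Int.mod ((char.toNat : Int) - 32 -
          PySem.Int.mod ((PySem.Dict.ofList key).getD "xor_value" 42) 95) 95 + 32).toNat)
        (g := fun char : Char => char)]
  rw [List.nil_append]
  refine congrArg String.ofList (List.map_congr_left fun ch _ => ?_)
  rw [perchar_eq _ hk0 hk95 ch]
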